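-- pv_equiv track=rewrite | github.com/goodlucky1215/algorithm | 1.모두의 알고리즘with파이썬/3.마지막/4.팩토리얼 구하기.py | max_m
-- ===== SOURCE A (Python) =====
-- def max_m(a,n):
--     if n==1:
--         return a[0]
--     m=max_m(a,n-1)
--     if m>a[n-1]:
--         return m
--     else:
--         return a[n-1]
-- ===== SOURCE B (Python) =====
-- def max_m(a, n):
--     m = a[0]
--     for i in range(1, n):
--         if a[i] > m:
--             m = a[i]
--     return m
-- ===== Notes on version B (the rewrite author's own statement) =====
-- stated objective: idiomatic
-- what changed: Replaced the recursion (one stack frame per element) with a single forward loop keeping a running maximum.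
import Mathlib
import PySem

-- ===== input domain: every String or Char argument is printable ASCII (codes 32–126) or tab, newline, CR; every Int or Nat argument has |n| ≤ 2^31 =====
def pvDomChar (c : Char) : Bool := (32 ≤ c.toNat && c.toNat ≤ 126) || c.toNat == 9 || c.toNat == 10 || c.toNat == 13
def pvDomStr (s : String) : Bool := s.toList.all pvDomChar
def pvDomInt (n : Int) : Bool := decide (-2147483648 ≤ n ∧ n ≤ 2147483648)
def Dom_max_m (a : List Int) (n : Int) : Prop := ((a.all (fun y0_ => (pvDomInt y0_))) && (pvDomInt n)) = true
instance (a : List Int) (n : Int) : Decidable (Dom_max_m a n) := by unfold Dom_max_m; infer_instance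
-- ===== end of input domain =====

-- B replaces A's recursion by a forward loop with a running maximum (idiomatic; O(1) space).

-- ===== PORT A =====
-- The 'n ≤ 1' guard makes the recursion total; for n ≤ 0 Python A diverges (outside Pre_).
def max_m (a : List Int) (n : Int) : Int :=
  if n ≤ 1 then (PySem.List.pyGet? a 0).getD 0
  else
    let m := max_m a (n - 1)
    let v := (PySem.List.pyGet? a (n - 1)).getD 0
    if m > v then m else v
termination_by n.toNat
decreasing_by omega

-- ===== PORT B =====
def max_m_alt (a : List Int) (n : Int) : Int :=
  (PySem.List.pyRange 1 n 1).foldl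
    (fun m i => let v := (PySem.List.pyGet? a i).getD 0; if v > m then v else m)
    ((PySem.List.pyGet? a 0).getD 0)

-- ===== PRECONDITION & SPEC =====
-- Pre_ excludes exactly the inputs where Python A raises: n ≤ 0 (RecursionError) and n > len(a) (IndexError).
def Pre_max_m (a : List Int) (n : Int) : Prop := 1 ≤ n ∧ n ≤ a.length
instance (a : List Int) (n : Int) : Decidable (Pre_max_m a n) := by unfold Pre_max_m; infer_instance
def pvWitness_max_m : List Int × Int := ([3, 1, 4, 1, 5], 4)

def Spec_max_m (a : List Int) (n : Int) (out : Int) : Prop := out = max_m_alt a n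
instance (a : List Int) (n : Int) (out : Int) : Decidable (Spec_max_m a n out) := by unfold Spec_max_m; infer_instance

-- ===== CLAIM (what is proved, stated in full; the proofs are below) =====
def Claim_equal_max_m : Prop := ∀ (a : List Int) (n : Int), Dom_max_m a n → Pre_max_m a n → Spec_max_m a n (max_m a n)

-- ===== LEMMAS AND PROOFS =====

theorem max_m_eq_alt (a : List Int) : ∀ (n : Int), 1 ≤ n → max_m a n = max_m_alt a n := by
  intro n hn
  induction n, hn using Int.le_induction with
  | base =>
      simp [max_m, max_m_alt, PySem.List.pyRange_one_eq_nil (by omega : (1:Int) ≤ 1)]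
  | succ n hn1 ih =>
      rw [max_m]
      rw [if_neg (by omega)]
      unfold max_m_alt
      rw [PySem.List.pyRange_one_succ_right (by omega : (1:Int) ≤ n), List.foldl_append]
      simp only [List.foldl_cons, List.foldl_nil]
      rw [show n + 1 - 1 = n by ring, ih]
      unfold max_m_alt
      set w := ((PySem.List.pyRange 1 n 1).foldl
        (fun m i => let v := (PySem.List.pyGet? a i).getD 0; if v > m then v else m)
        ((PySem.List.pyGet? a 0).getD 0)) with hw
      set v := (PySem.List.pyGet? a n).getD 0 with hv
      split_ifs <;> omega
-- ===== VERDICT (by name: the statement is the Claim_ definition above) =====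
theorem max_m_spec : Claim_equal_max_m := by
  intro a n _ hpre
  unfold Spec_max_m
  exact max_m_eq_alt a n hpre.1
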